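-- pv_equiv track=rewrite | github.com/h4ckxel/Coding-Learning | ExamenPractico.py | contar_elementos
-- ===== SOURCE A (Python) =====
-- def contar_elementos(lista):
--     if len(lista) == 1:
--         return 1
--
--     # Se partea la mitad la lista
--     mitad = len(lista) // 2
--     izquierda = lista[:mitad]
--     derecha = lista[mitad:]
--
--     # Cuenta los elementos de la lista
--     conteo_total = len(lista)
--     conteo_izquierda = contar_elementos(izquierda)
--     conteo_derecha = contar_elementos(derecha)
--     # Suma los conteos de la division
--     return conteo_total + conteo_izquierda + conteo_derecha
-- ===== SOURCE B (Python) =====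
-- def contar_elementos(lista):
--     # The recursion depends only on the segment LENGTH: f(n) = n + f(n//2) + f((n+1)//2),
--     # f(1) = 1.  Compute it on the length alone with memoization: O(log n) distinct lengths
--     # instead of materializing O(n log n) list slices.
--     memo = {1: 1}
--
--     def f(m):
--         if m not in memo:
--             memo[m] = m + f(m // 2) + f((m + 1) // 2)
--         return memo[m]
--
--     return f(len(lista))
-- ===== Notes on version B (the rewrite author's own statement) =====
-- stated objective: faster
-- what changed: B never slices the list: it computes the count from the length alone via the memoized recurrence f(n)=n+f(n//2)+f((n+1)//2), so only O(log n) subproblems are evaluated instead of building O(n log n) sublist copies.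
import Mathlib
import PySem

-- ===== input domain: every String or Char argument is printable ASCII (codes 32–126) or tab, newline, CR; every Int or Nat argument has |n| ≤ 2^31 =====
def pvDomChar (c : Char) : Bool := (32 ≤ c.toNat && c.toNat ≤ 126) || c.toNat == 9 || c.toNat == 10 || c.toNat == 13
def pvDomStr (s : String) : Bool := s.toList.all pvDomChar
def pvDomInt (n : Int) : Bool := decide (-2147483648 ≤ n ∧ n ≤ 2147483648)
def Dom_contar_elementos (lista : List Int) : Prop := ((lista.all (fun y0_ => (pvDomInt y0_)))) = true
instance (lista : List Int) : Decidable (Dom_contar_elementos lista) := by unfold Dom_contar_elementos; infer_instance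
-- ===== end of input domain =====

-- B computes the same count from the list length alone (the recursion depends only on
-- lengths); proven equal to A on every nonempty list (A recurses forever on []).

-- ===== PORT A =====
def contar_elementos (lista : List Int) : Int :=
  if lista.length = 1 then 1
  else if lista.length = 0 then 0  -- Python A never returns on []; excluded by Pre_
  else
    let mitad : Nat := lista.length / 2          -- len(lista) // 2 (nonnegative, floor = Nat division)
    let izquierda := PySem.List.slice lista none (some (mitad : Int))   -- lista[:mitad]
    let derecha := PySem.List.slice lista (some (mitad : Int)) none     -- lista[mitad:]
    (lista.length : Int) + contar_elementos izquierda + contar_elementos derecha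
termination_by lista.length
decreasing_by
  · simp only [PySem.List.slice_to_natCast, List.length_take]; omega
  · simp only [PySem.List.slice_from_natCast, List.length_drop]; omega

-- ===== PORT B =====
-- Source B's f on the length; the memo dict is pure memoization, so the recursion itself is ported.
def pvF (m : Nat) : Int :=
  if m ≤ 1 then (m : Int)   -- f(1)=1 from the memo; f(0) never returns in Python (excluded by Pre_)
  else (m : Int) + pvF (m / 2) + pvF ((m + 1) / 2)
termination_by m
decreasing_by
  · omega
  · omega

def contar_elementos_alt (lista : List Int) : Int := pvF lista.length

-- ===== PRECONDITION & SPEC =====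
-- A (and B) recurse forever on the empty list, so it is excluded.
def Pre_contar_elementos (lista : List Int) : Prop := lista ≠ []
instance (lista : List Int) : Decidable (Pre_contar_elementos lista) := by unfold Pre_contar_elementos; infer_instance
def pvWitness_contar_elementos : List Int := [3, 1, 2]

def Spec_contar_elementos (lista : List Int) (out : Int) : Prop := out = contar_elementos_alt lista
instance (lista : List Int) (out : Int) : Decidable (Spec_contar_elementos lista out) := by unfold Spec_contar_elementos; infer_instance

-- ===== CLAIM (what is proved, stated in full; the proofs are below) =====
def Claim_equal_contar_elementos : Prop := ∀ (lista : List Int), Dom_contar_elementos lista → Pre_contar_elementos lista → Spec_contar_elementos lista (contar_elementos lista)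

-- ===== LEMMAS AND PROOFS =====
theorem contar_eq_pvF : ∀ (n : Nat) (lista : List Int), lista.length = n → lista ≠ [] →
    contar_elementos lista = pvF lista.length := by
  intro n
  induction n using Nat.strong_induction_on with
  | _ n ih =>
    intro lista hlen hne
    rw [contar_elementos]
    have hpos : 0 < lista.length := List.length_pos_of_ne_nil hne
    by_cases h1 : lista.length = 1
    · simp [h1, pvF]
    · have h2 : 2 ≤ lista.length := by omega
      rw [pvF]
      simp only [PySem.List.slice_to_natCast, PySem.List.slice_from_natCast]
      have htake : (lista.take (lista.length / 2)).length = lista.length / 2 := by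
        simp; omega
      have hdrop : (lista.drop (lista.length / 2)).length = (lista.length + 1) / 2 := by
        simp; omega
      have hL := ih (lista.take (lista.length / 2)).length (by omega)
        (lista.take (lista.length / 2)) rfl
        (by intro h; rw [h] at htake; simp at htake; omega)
      have hR := ih (lista.drop (lista.length / 2)).length (by omega)
        (lista.drop (lista.length / 2)) rfl
        (by intro h; rw [h] at hdrop; simp at hdrop; omega)
      rw [hL, hR, htake, hdrop]
      simp [h1, Nat.ne_of_gt hpos, hpos.ne']
      omega

-- ===== VERDICT (by name: the statement is the Claim_ definition above) =====
theorem contar_elementos_spec : Claim_equal_contar_elementos := by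
  intro lista _ hpre
  unfold Spec_contar_elementos contar_elementos_alt
  exact contar_eq_pvF lista.length lista rfl hpre
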